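-- pv_equiv track=rewrite | github.com/014-Jayal/career-readiness-agent | backend/agents/market_agent.py | prioritize_skills
-- ===== SOURCE A (Python) =====
-- from typing import List, Dict
--
-- def prioritize_skills(
--     missing_skills: List[str],
--     role_priority: Dict[str, List[str]]
-- ) -> Dict[str, List[str]]:
--     """
--     Prioritizes missing skills based on role importance.
--     """
--
--     prioritized = {
--         "high_priority": [],
--         "medium_priority": [],
--         "low_priority": []
--     }
--
--     for skill in missing_skills:
--         if skill in role_priority.get("high", []):
--             prioritized["high_priority"].append(skill)
--         elif skill in role_priority.get("medium", []):
--             prioritized["medium_priority"].append(skill)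
--         else:
--             prioritized["low_priority"].append(skill)
--
--     return prioritized
-- ===== SOURCE B (Python) =====
-- def prioritize_skills(missing_skills, role_priority):
--     """Partition twice: peel off the high-priority skills, then split the rest by medium."""
--     def split(skills, ref):
--         hits, rest = [], []
--         for s in skills:
--             (hits if s in ref else rest).append(s)
--         return hits, rest
--
--     high, rest = split(missing_skills, role_priority.get("high", []))
--     medium, low = split(rest, role_priority.get("medium", []))
--     return {"high_priority": high, "medium_priority": medium, "low_priority": low}
-- ===== Notes on version B (the rewrite author's own statement) =====
-- stated objective: alternative
-- what changed: Instead of dispatching each skill into one of three bucket lists inside a single if/elif loop over a pre-built dict, B stages two binary partitions: it first splits missing_skills into (high, rest) by membership in role_priority['high'], then splits rest into (medium, low) by membership in role_priority['medium'], and assembles the result dict from the three lists at the end.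
import Mathlib
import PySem

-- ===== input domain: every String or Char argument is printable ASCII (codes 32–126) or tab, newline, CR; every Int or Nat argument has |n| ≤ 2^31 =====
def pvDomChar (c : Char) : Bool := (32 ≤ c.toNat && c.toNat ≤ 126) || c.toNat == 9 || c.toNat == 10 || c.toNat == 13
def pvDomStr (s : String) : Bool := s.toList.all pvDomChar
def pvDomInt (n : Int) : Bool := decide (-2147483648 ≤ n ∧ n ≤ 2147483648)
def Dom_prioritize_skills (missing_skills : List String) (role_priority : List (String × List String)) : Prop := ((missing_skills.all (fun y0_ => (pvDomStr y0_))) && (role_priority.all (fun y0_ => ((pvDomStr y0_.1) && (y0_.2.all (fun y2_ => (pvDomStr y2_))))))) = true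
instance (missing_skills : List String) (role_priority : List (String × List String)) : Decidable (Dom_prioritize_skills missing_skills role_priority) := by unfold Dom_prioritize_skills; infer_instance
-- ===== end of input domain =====

-- B replaces A's single if/elif dispatch loop into three dict buckets with two staged
-- binary partitions (split off high, then split the rest by medium) assembled at the end.

-- ===== PORT A =====
def prioritize_skills (missing_skills : List String) (role_priority : List (String × List String)) : List (String × List String) :=
  let prioritized : PySem.Dict String (List String) :=
    ((PySem.Dict.empty.insert "high_priority" []).insert "medium_priority" []).insert "low_priority" []
  let prioritized := missing_skills.foldl (fun d skill =>
    if skill ∈ (PySem.Dict.mk role_priority).getD "high" [] then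
      d.modify "high_priority" [] (· ++ [skill])
    else if skill ∈ (PySem.Dict.mk role_priority).getD "medium" [] then
      d.modify "medium_priority" [] (· ++ [skill])
    else
      d.modify "low_priority" [] (· ++ [skill])) prioritized
  prioritized.items

-- ===== PORT B =====
-- the inner helper `split`: one pass appending each skill to hits or rest
def pvSplit (skills ref : List String) : List String × List String :=
  skills.foldl (fun acc s =>
    if s ∈ ref then (acc.1 ++ [s], acc.2) else (acc.1, acc.2 ++ [s])) ([], [])

def prioritize_skills_alt (missing_skills : List String) (role_priority : List (String × List String)) : List (String × List String) :=
  let hr := pvSplit missing_skills ((PySem.Dict.mk role_priority).getD "high" [])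
  let ml := pvSplit hr.2 ((PySem.Dict.mk role_priority).getD "medium" [])
  [("high_priority", hr.1), ("medium_priority", ml.1), ("low_priority", ml.2)]

-- ===== PRECONDITION & SPEC =====
def Spec_prioritize_skills (missing_skills : List String) (role_priority : List (String × List String)) (out : List (String × List String)) : Prop := out = prioritize_skills_alt missing_skills role_priority
instance (missing_skills : List String) (role_priority : List (String × List String)) (out : List (String × List String)) : Decidable (Spec_prioritize_skills missing_skills role_priority out) := by unfold Spec_prioritize_skills; infer_instance

-- ===== CLAIM =====
def Claim_equal_prioritize_skills : Prop := ∀ (missing_skills : List String) (role_priority : List (String × List String)), Dom_prioritize_skills missing_skills role_priority → Spec_prioritize_skills missing_skills role_priority (prioritize_skills missing_skills role_priority)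

-- ===== LEMMAS AND PROOFS =====

-- B's split is the two filters of the input list
theorem pvSplit_eq (skills ref : List String) :
    pvSplit skills ref
      = (skills.filter (fun s => s ∈ ref), skills.filter (fun s => ¬ s ∈ ref)) := by
  unfold pvSplit
  suffices h : ∀ (a b : List String),
      skills.foldl (fun acc s =>
        if s ∈ ref then (acc.1 ++ [s], acc.2) else (acc.1, acc.2 ++ [s])) (a, b)
      = (a ++ skills.filter (fun s => s ∈ ref), b ++ skills.filter (fun s => ¬ s ∈ ref)) by
    simpa using h [] []
  induction skills with
  | nil => simp
  | cons x xs ih =>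
    intro a b
    by_cases hx : x ∈ ref <;> simp [hx, ih]

-- the three-bucket dict A folds over, with variable contents
def pvD (h m l : List String) : PySem.Dict String (List String) :=
  ((PySem.Dict.empty.insert "high_priority" h).insert "medium_priority" m).insert "low_priority" l

theorem pvD_modify_high (h m l : List String) (f : List String → List String) :
    (pvD h m l).modify "high_priority" [] f = pvD (f h) m l := rfl
theorem pvD_modify_med (h m l : List String) (f : List String → List String) :
    (pvD h m l).modify "medium_priority" [] f = pvD h (f m) l := rfl
theorem pvD_modify_low (h m l : List String) (f : List String → List String) :
    (pvD h m l).modify "low_priority" [] f = pvD h m (f l) := rfl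
theorem pvD_items (h m l : List String) :
    (pvD h m l).items = [("high_priority", h), ("medium_priority", m), ("low_priority", l)] := rfl

-- A's loop, characterized: each bucket collects its filter of the input
theorem A_fold (H M : List String) (missing : List String) (h m l : List String) :
    missing.foldl (fun d skill =>
      if skill ∈ H then d.modify "high_priority" [] (· ++ [skill])
      else if skill ∈ M then d.modify "medium_priority" [] (· ++ [skill])
      else d.modify "low_priority" [] (· ++ [skill])) (pvD h m l)
    = pvD (h ++ missing.filter (fun s => s ∈ H))
          (m ++ missing.filter (fun s => ¬ s ∈ H ∧ s ∈ M))
          (l ++ missing.filter (fun s => ¬ s ∈ H ∧ ¬ s ∈ M)) := by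
  induction missing generalizing h m l with
  | nil => simp
  | cons x xs ih =>
    by_cases hH : x ∈ H
    · simp [hH, pvD_modify_high, ih]
    · by_cases hM : x ∈ M
      · simp [hH, hM, pvD_modify_med, ih]
      · simp [hH, hM, pvD_modify_low, ih]

-- ===== VERDICT =====
theorem prioritize_skills_spec : Claim_equal_prioritize_skills := by
  intro missing role_priority _
  unfold Spec_prioritize_skills prioritize_skills prioritize_skills_alt
  dsimp only
  rw [show ((PySem.Dict.empty.insert "high_priority" ([] : List String)).insert "medium_priority" []).insert "low_priority" [] = pvD [] [] [] from rfl]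
  rw [A_fold, pvD_items, pvSplit_eq, pvSplit_eq]
  simp [List.filter_filter]
  constructor
  · exact List.filter_congr (fun x _ => by by_cases hH : x ∈ (PySem.Dict.mk role_priority).getD "high" [] <;> by_cases hM : x ∈ (PySem.Dict.mk role_priority).getD "medium" [] <;> simp [hH, hM])
  · exact List.filter_congr (fun x _ => by by_cases hH : x ∈ (PySem.Dict.mk role_priority).getD "high" [] <;> by_cases hM : x ∈ (PySem.Dict.mk role_priority).getD "medium" [] <;> simp [hH, hM])
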